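-- pv_equiv track=rewrite | github.com/Useremaining/UnivCorsica | at3_Chene_A_ex3.py | outPutStr
-- ===== SOURCE A (Python) =====
-- def outPutStr(word:str,l_list:list[int])->str:
--     if word:
--         hash_word = ""
--         for i in range(len(word)):
--             if i in l_list:
--                 hash_word += str(word[i])+" "
--             else:
--                 hash_word += "_ "
--     else:
--         hash_word = "Error : no word "
--     return hash_word
-- ===== SOURCE B (Python) =====
-- def outPutStr(word: str, l_list: list[int]) -> str:
--     if not word:
--         return "Error : no word "
--     tokens = ["_ "] * len(word)
--     for idx in l_list:
--         if 0 <= idx < len(word):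
--             tokens[idx] = word[idx] + " "
--     return "".join(tokens)
-- ===== Notes on version B (the rewrite author's own statement) =====
-- stated objective: faster
-- what changed: B replaces the per-position membership scan of l_list (O(len(word)*len(l_list))) with an all-masked token array into which the revealed characters are scattered by one pass over l_list, joined once at the end.
import Mathlib
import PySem

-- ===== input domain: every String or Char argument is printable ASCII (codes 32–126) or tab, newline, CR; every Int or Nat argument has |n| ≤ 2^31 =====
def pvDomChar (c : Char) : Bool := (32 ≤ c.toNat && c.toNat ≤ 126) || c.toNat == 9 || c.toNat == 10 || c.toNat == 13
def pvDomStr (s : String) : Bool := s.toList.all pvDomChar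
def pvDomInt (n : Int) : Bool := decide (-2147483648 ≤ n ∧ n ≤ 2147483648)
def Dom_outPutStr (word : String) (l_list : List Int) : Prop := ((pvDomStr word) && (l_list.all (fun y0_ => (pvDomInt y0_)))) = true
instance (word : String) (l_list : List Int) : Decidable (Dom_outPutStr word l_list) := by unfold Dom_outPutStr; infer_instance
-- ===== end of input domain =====

-- B builds an all-masked token list and scatters the revealed characters in one pass over
-- l_list instead of testing membership at every position; return values proved equal on all inputs.

-- ===== PORT A =====
-- 'for i in range(len(word)): hash_word += …' as a left fold over the index range;
-- 'i in l_list' is membership of the (nonnegative) Python index in l_list.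
def outPutStr (word : String) (l_list : List Int) : String :=
  if word ≠ "" then
    (List.range word.length).foldl
      (fun hash_word (i : Nat) =>
        if (i : Int) ∈ l_list then
          hash_word ++ String.singleton (word.toList.getD i ' ') ++ " "
        else
          hash_word ++ "_ ") ""
  else
    "Error : no word "

-- ===== PORT B =====
-- loop body of B: 'if 0 <= idx < len(word): tokens[idx] = word[idx] + " "'
def pvScatterStep (word : String) (t : List String) (idx : Int) : List String :=
  if 0 ≤ idx ∧ idx < (word.length : Int) then
    t.set idx.toNat (String.singleton (word.toList.getD idx.toNat ' ') ++ " ")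
  else t

-- tokens = ["_ "] * len(word); scatter word[idx]+" " for each valid idx; "".join(tokens)
def outPutStr_alt (word : String) (l_list : List Int) : String :=
  if word = "" then
    "Error : no word "
  else
    String.join (l_list.foldl (pvScatterStep word) (List.replicate word.length "_ "))

-- ===== PRECONDITION & SPEC =====
def Spec_outPutStr (word : String) (l_list : List Int) (out : String) : Prop := out = outPutStr_alt word l_list
instance (word : String) (l_list : List Int) (out : String) : Decidable (Spec_outPutStr word l_list out) := by unfold Spec_outPutStr; infer_instance

-- ===== CLAIM (what is proved, stated in full; the proofs are below) =====
def Claim_equal_outPutStr : Prop := ∀ (word : String) (l_list : List Int), Dom_outPutStr word l_list → Spec_outPutStr word l_list (outPutStr word l_list)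

-- ===== LEMMAS AND PROOFS =====

-- the revealed/masked piece at position i
def pvPiece (word : String) (l_list : List Int) (i : Nat) : String :=
  if (i : Int) ∈ l_list then String.singleton (word.toList.getD i ' ') ++ " " else "_ "

theorem pvFoldAcc (l : List String) (s t : String) :
    l.foldl (fun r x => r ++ x) (s ++ t) = s ++ l.foldl (fun r x => r ++ x) t := by
  induction l generalizing t with
  | nil => simp
  | cons b l ih => rw [List.foldl_cons, List.foldl_cons, String.append_assoc, ih]

theorem pvJoinCons (a : String) (l : List String) :
    String.join (a :: l) = a ++ String.join l := by
  simp only [String.join, List.foldl_cons]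
  rw [show ("" ++ a : String) = a ++ "" by simp, pvFoldAcc]

-- appending a piece at each step is joining the mapped pieces
theorem pvFoldAppend (f : Nat → String) (l : List Nat) (s : String) :
    l.foldl (fun x y => x ++ f y) s = s ++ String.join (l.map f) := by
  induction l generalizing s with
  | nil => simp [String.join]
  | cons a l ih =>
    rw [List.foldl_cons, ih, List.map_cons, pvJoinCons, String.append_assoc]

-- A's fold appends pieces, so it is the join of the pieces
theorem pvFoldA (word : String) (l_list : List Int) (l : List Nat) (s : String) :
    l.foldl
      (fun hash_word (i : Nat) =>
        if (i : Int) ∈ l_list then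
          hash_word ++ String.singleton (word.toList.getD i ' ') ++ " "
        else
          hash_word ++ "_ ") s
    = s ++ String.join (l.map (pvPiece word l_list)) := by
  have h : (fun (hash_word : String) (i : Nat) =>
      if (i : Int) ∈ l_list then
        hash_word ++ String.singleton (word.toList.getD i ' ') ++ " "
      else
        hash_word ++ "_ ")
      = fun (x : String) (i : Nat) => x ++ pvPiece word l_list i := by
    funext x i
    by_cases h : (i : Int) ∈ l_list <;>
      simp [pvPiece, h, String.append_assoc, -String.append_singleton]
  rw [h, pvFoldAppend]

-- B's scatter fold keeps the length
theorem pvScatterLen (word : String) (l_list : List Int) (t : List String) :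
    (l_list.foldl (pvScatterStep word) t).length = t.length := by
  induction l_list generalizing t with
  | nil => rfl
  | cons a l ih =>
    simp only [List.foldl_cons]
    rw [ih]
    unfold pvScatterStep
    split <;> simp

-- B's scatter fold, read at any in-range position i: revealed iff i occurs in the index list
theorem pvScatterGet (word : String) (l_list : List Int) (t : List String)
    (ht : t.length = word.length) (i : Nat) (hi : i < word.length) :
    (l_list.foldl (pvScatterStep word) t).getD i ""
    = if (i : Int) ∈ l_list then String.singleton (word.toList.getD i ' ') ++ " "
      else t.getD i "" := by
  induction l_list generalizing t with
  | nil => simp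
  | cons a l ih =>
    simp only [List.foldl_cons]
    by_cases ha : 0 ≤ a ∧ a < (word.length : Int)
    · rw [ih _ (by simp [pvScatterStep, ha, ht])]
      by_cases hm : (i : Int) ∈ l
      · simp [hm]
      · by_cases hia : a = (i : Int)
        · have h2 : a.toNat = i := by omega
          simp [hia.symm, pvScatterStep, ha, h2, List.getD, ht, hi]
        · have h2 : a.toNat ≠ i := by omega
          simp [hm, List.mem_cons, Ne.symm hia, pvScatterStep, ha, List.getD,
            List.getElem?_set_ne h2]
    · rw [show pvScatterStep word t a = t by simp [pvScatterStep, ha], ih _ ht]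
      have hia : a ≠ (i : Int) := by omega
      simp [List.mem_cons, Ne.symm hia]

-- B's token list equals the list of pieces over the index range
theorem pvTokensEq (word : String) (l_list : List Int) :
    l_list.foldl (pvScatterStep word) (List.replicate word.length "_ ")
    = (List.range word.length).map (pvPiece word l_list) := by
  have hlen := pvScatterLen word l_list (List.replicate word.length "_ ")
  apply List.ext_getElem
  · rw [hlen]; simp
  · intro i h1 h2
    have hi : i < word.length := by
      rw [hlen, List.length_replicate] at h1; exact h1
    have hget := pvScatterGet word l_list (List.replicate word.length "_ ")
      (by simp) i hi
    rw [List.getD_eq_getElem _ _ h1] at hget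
    rw [hget]
    simp [pvPiece, List.getD, hi]

-- ===== VERDICT (by name: the statement is the Claim_ definition above) =====
theorem outPutStr_spec : Claim_equal_outPutStr := by
  intro word l_list _
  unfold Spec_outPutStr outPutStr outPutStr_alt
  by_cases hw : word = ""
  · simp [hw]
  · simp only [hw, ne_eq, not_false_iff, if_true, if_false]
    rw [pvFoldA, pvTokensEq]
    simp
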